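-- pv_equiv track=rewrite | github.com/bitflow-stream/python-bitflow | core/zerops/test.py | get_n_best_prediction
-- ===== SOURCE A (Python) =====
-- def get_n_best_prediction(lst, n, skip_indices=None):
--     if n > len(lst):
--         raise ValueError("n cannot be greater than the number of predicted classes. Maximal value for n can be {} "
--                          "but n is actually {}".format(len(lst), n))
--     if not skip_indices:
--         skip_indices = []
--     n -= 1
--     max_index, max_score = -1, -1
--     for i, score in enumerate(lst):
--         if i not in skip_indices and score > max_score:
--             max_index, max_score = i, score
--     if n == 0:
--         return max_index, max_score
--     else:
--         skip_indices.append(max_index)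
--         return get_n_best_prediction(lst, n, skip_indices)
-- ===== SOURCE B (Python) =====
-- def get_n_best_prediction(lst, n, skip_indices=None):
--     if n > len(lst):
--         raise ValueError("n cannot be greater than the number of predicted classes. Maximal value for n can be {} "
--                          "but n is actually {}".format(len(lst), n))
--     skip = set(skip_indices) if skip_indices else set()
--     cand = sorted(((i, s) for i, s in enumerate(lst) if i not in skip and s > -1),
--                   key=lambda p: (-p[1], p[0]))
--     if n - 1 < len(cand):
--         return cand[n - 1]
--     return (-1, -1)
-- ===== Notes on version B (the rewrite author's own statement) =====
-- stated objective: faster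
-- what changed: A repeatedly rescans the whole list once per rank (recursing with a growing skip list scanned linearly inside the loop); B builds the eligible (index, score) pairs once, sorts them by (-score, index), and returns the (n-1)-th entry, with (-1, -1) when fewer than n eligible entries exist (scores <= -1 are never picked, exactly as in A).
import Mathlib
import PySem

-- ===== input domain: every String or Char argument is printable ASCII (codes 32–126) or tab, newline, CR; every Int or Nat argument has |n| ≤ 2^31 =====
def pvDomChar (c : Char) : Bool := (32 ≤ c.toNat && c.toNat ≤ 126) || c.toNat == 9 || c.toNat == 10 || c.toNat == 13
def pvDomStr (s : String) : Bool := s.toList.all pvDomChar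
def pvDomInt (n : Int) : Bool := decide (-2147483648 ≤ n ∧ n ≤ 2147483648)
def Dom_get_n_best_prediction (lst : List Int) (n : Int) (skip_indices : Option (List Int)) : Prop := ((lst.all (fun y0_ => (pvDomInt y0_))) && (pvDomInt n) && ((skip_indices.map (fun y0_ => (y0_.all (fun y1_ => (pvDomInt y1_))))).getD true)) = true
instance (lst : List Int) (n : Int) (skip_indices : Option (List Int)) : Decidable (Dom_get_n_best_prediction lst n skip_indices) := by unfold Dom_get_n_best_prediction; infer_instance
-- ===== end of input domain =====

-- B replaces A's per-rank rescan recursion by one sort of the eligible (index, score) pairs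
-- by (-score, index); objective: faster (asymptotic). Return-value equivalence only: A mutates
-- a caller-supplied non-empty skip_indices list (appends picks) while B does not.


-- ===== PORT A =====
-- the 'for i, score in enumerate(lst)' running-max loop of A (strict '>', so first maximum wins)
def pvMaxA (lst : List Int) (skip : List Int) : Int × Int :=
  (PySem.List.enumerate lst 0).foldl
    (fun acc p => if p.1 ∉ skip ∧ p.2 > acc.2 then (p.1, p.2) else acc) (-1, -1)

-- A's tail recursion; fuel = (n - 1).toNat counts the remaining recursive calls
-- (Python diverges for n ≤ 0: those inputs are outside Pre_).
def pvRecA (lst : List Int) : Nat → List Int → Int × Int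
  | fuel, skip =>
    let m := pvMaxA lst skip
    match fuel with
    | 0 => m
    | f + 1 => pvRecA lst f (skip ++ [m.1])

def get_n_best_prediction (lst : List Int) (n : Int) (skip_indices : Option (List Int)) : Int × Int :=
  if n > (lst.length : Int) then (-1, -1)  -- Python raises ValueError here; outside Pre_
  else
    -- 'if not skip_indices: skip_indices = []' : None and [] both become []
    let skip : List Int := match skip_indices with
      | none => []
      | some s => s
    pvRecA lst (n - 1).toNat skip

-- ===== PORT B =====
def get_n_best_prediction_alt (lst : List Int) (n : Int) (skip_indices : Option (List Int)) : Int × Int :=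
  if n > (lst.length : Int) then (-1, -1)  -- Python raises ValueError here; outside Pre_
  else
    -- skip = set(skip_indices) if skip_indices else set()   (set([]) = set())
    let skip : PySem.Set Int := match skip_indices with
      | none => PySem.Set.empty
      | some s => PySem.Set.ofList s
    let cand := PySem.List.sorted2
      ((PySem.List.enumerate lst 0).filter (fun p => decide (p.1 ∉ skip) && decide (p.2 > -1)))
      (fun p => -p.2) (fun p => p.1)
    if n - 1 < (cand.length : Int) then (PySem.List.pyGet? cand (n - 1)).getD (-1, -1)
    else (-1, -1)

-- ===== PRECONDITION & SPEC =====
-- Pre_ excludes exactly the inputs on which the Python A raises: n > len(lst) (ValueError)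
-- and n ≤ 0 (unbounded recursion, RecursionError). A returns normally on every other input.
def Pre_get_n_best_prediction (lst : List Int) (n : Int) (skip_indices : Option (List Int)) : Prop :=
  1 ≤ n ∧ n ≤ (lst.length : Int)
instance (lst : List Int) (n : Int) (skip_indices : Option (List Int)) : Decidable (Pre_get_n_best_prediction lst n skip_indices) := by unfold Pre_get_n_best_prediction; infer_instance

def pvWitness_get_n_best_prediction : List Int × Int × Option (List Int) := ([3, 1, 2], 2, some [1])

def Spec_get_n_best_prediction (lst : List Int) (n : Int) (skip_indices : Option (List Int)) (out : Int × Int) : Prop := out = get_n_best_prediction_alt lst n skip_indices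
instance (lst : List Int) (n : Int) (skip_indices : Option (List Int)) (out : Int × Int) : Decidable (Spec_get_n_best_prediction lst n skip_indices out) := by unfold Spec_get_n_best_prediction; infer_instance

-- ===== CLAIM (what is proved, stated in full; the proofs are below) =====
def Claim_equal_get_n_best_prediction : Prop := ∀ (lst : List Int) (n : Int) (skip_indices : Option (List Int)), Dom_get_n_best_prediction lst n skip_indices → Pre_get_n_best_prediction lst n skip_indices → Spec_get_n_best_prediction lst n skip_indices (get_n_best_prediction lst n skip_indices)

-- ===== LEMMAS AND PROOFS =====

-- the sort key of B, as a single lexicographic key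
def pvKey (p : Int × Int) : Int ×ₗ Int := toLex (-p.2, p.1)

-- eligible (index, score) pairs, and B's sorted candidate list
def pvE (lst skip : List Int) : List (Int × Int) :=
  (PySem.List.enumerate lst 0).filter (fun p => decide (p.1 ∉ skip) && decide (p.2 > -1))

def pvSorted (lst skip : List Int) : List (Int × Int) :=
  PySem.List.sorted (pvE lst skip) pvKey false

lemma pvKey_inj : Function.Injective pvKey := by
  intro p q h
  have h' : (-p.2, p.1) = (-q.2, q.1) := toLex.injective h
  obtain ⟨h1, h2⟩ := Prod.mk.injEq .. ▸ h'
  exact Prod.ext h2 (by omega)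

-- sorted2 with keys (k1, k2) is sorted with the lexicographic key
lemma pvSorted2_eq_sorted (xs : List (Int × Int)) (k1 k2 : Int × Int → Int) :
    PySem.List.sorted2 xs k1 k2 false
      = PySem.List.sorted xs (fun x => (toLex (k1 x, k2 x) : Int ×ₗ Int)) false := by
  have hbe : (fun (a b : Int × Int) => decide (k1 a < k1 b) || !decide (k1 b < k1 a) && decide (k2 a < k2 b))
      = (fun (a b : Int × Int) => decide ((toLex (k1 a, k2 a) : Int ×ₗ Int) < toLex (k1 b, k2 b))) := by
    funext a b
    rcases lt_trichotomy (k1 a) (k1 b) with h | h | h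
    · simp [Prod.Lex.lt_iff, h]
    · simp [Prod.Lex.lt_iff, h]
    · simp [Prod.Lex.lt_iff, h, not_lt.2 (le_of_lt h), ne_of_gt h]
  simp only [PySem.List.sorted2, PySem.List.sorted, hbe, Bool.false_eq_true, if_false]

lemma pvE_fst_nonneg {lst skip : List Int} {p : Int × Int} (hp : p ∈ pvE lst skip) : 0 ≤ p.1 := by
  have hm : p ∈ PySem.List.enumerate lst 0 := List.mem_of_mem_filter hp
  obtain ⟨k, hk, rfl⟩ := (PySem.List.mem_enumerate_iff _ _ _).1 hm
  simp

lemma pvE_nodup_key (lst skip : List Int) :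
    (pvE lst skip).Pairwise (fun a b => pvKey a ≠ pvKey b) := by
  have h := (PySem.List.pairwise_lt_enumerate lst 0).filter
      (p := fun p => decide (p.1 ∉ skip) && decide (p.2 > -1))
  exact h.imp (fun {a b} hab => fun hk => by
    have := pvKey_inj hk; subst this; exact lt_irrefl _ hab)

-- the sorted candidate list is STRICTLY increasing in pvKey
lemma pvSorted_pairwise_lt (lst skip : List Int) :
    (pvSorted lst skip).Pairwise (fun a b => pvKey a < pvKey b) := by
  have hle := PySem.List.sorted_pairwise (pvE lst skip) pvKey
  have hne : (pvSorted lst skip).Pairwise (fun a b => pvKey a ≠ pvKey b) :=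
    ((PySem.List.sorted_perm (pvE lst skip) pvKey false).pairwise_iff
      (fun {a b} h hk => h hk.symm)).2 (pvE_nodup_key lst skip)
  exact (hle.and hne).imp (fun {a b} h => lt_of_le_of_ne h.1 h.2)

-- running-max loop invariant (l must have strictly increasing indices)
lemma pvFold_inv (skip : List Int) (l : List (Int × Int))
    (hl : l.Pairwise (fun p q => p.1 < q.1)) (a : Int × Int) :
    (l.foldl (fun acc p => if p.1 ∉ skip ∧ p.2 > acc.2 then (p.1, p.2) else acc) a = a ∨
      (l.foldl (fun acc p => if p.1 ∉ skip ∧ p.2 > acc.2 then (p.1, p.2) else acc) a ∈ l ∧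
       (l.foldl (fun acc p => if p.1 ∉ skip ∧ p.2 > acc.2 then (p.1, p.2) else acc) a).1 ∉ skip ∧
       a.2 < (l.foldl (fun acc p => if p.1 ∉ skip ∧ p.2 > acc.2 then (p.1, p.2) else acc) a).2)) ∧
    a.2 ≤ (l.foldl (fun acc p => if p.1 ∉ skip ∧ p.2 > acc.2 then (p.1, p.2) else acc) a).2 ∧
    (∀ p ∈ l, p.1 ∉ skip →
      p.2 ≤ (l.foldl (fun acc p => if p.1 ∉ skip ∧ p.2 > acc.2 then (p.1, p.2) else acc) a).2) ∧
    (∀ p ∈ l, p.1 ∉ skip →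
      p.2 = (l.foldl (fun acc p => if p.1 ∉ skip ∧ p.2 > acc.2 then (p.1, p.2) else acc) a).2 →
      (l.foldl (fun acc p => if p.1 ∉ skip ∧ p.2 > acc.2 then (p.1, p.2) else acc) a = a ∨
       (l.foldl (fun acc p => if p.1 ∉ skip ∧ p.2 > acc.2 then (p.1, p.2) else acc) a).1 ≤ p.1)) := by
  induction l generalizing a with
  | nil => simp
  | cons q t ih =>
    have hqt : ∀ p ∈ t, q.1 < p.1 := fun p hp => (List.pairwise_cons.1 hl).1 p hp
    have hlt : t.Pairwise (fun p q => p.1 < q.1) := (List.pairwise_cons.1 hl).2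
    by_cases hc : q.1 ∉ skip ∧ q.2 > a.2
    · obtain ⟨I1, I2, I3, I4⟩ := ih hlt (q.1, q.2)
      simp only [List.foldl_cons, if_pos hc] at *
      refine ⟨?_, by omega, ?_, ?_⟩
      · rcases I1 with h | ⟨h1, h2, h3⟩
        · exact Or.inr ⟨by simp [h], by simpa [h] using hc.1, by rw [h]; exact hc.2⟩
        · exact Or.inr ⟨List.mem_cons_of_mem _ h1, h2, by omega⟩
      · intro p hp hps
        rcases List.mem_cons.1 hp with rfl | hp'
        · omega
        · exact I3 p hp' hps
      · intro p hp hps heq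
        rcases List.mem_cons.1 hp with rfl | hp'
        · rcases I1 with h | ⟨h1, h2, h3⟩
          · exact Or.inr (by simp [h])
          · exact absurd heq (by omega)
        · rcases I4 p hp' hps heq with h | h
          · exact Or.inr (by rw [h]; exact le_of_lt (hqt p hp'))
          · exact Or.inr h
    · obtain ⟨I1, I2, I3, I4⟩ := ih hlt a
      simp only [List.foldl_cons, if_neg hc] at *
      refine ⟨?_, I2, ?_, ?_⟩
      · rcases I1 with h | ⟨h1, h2, h3⟩
        · exact Or.inl h
        · exact Or.inr ⟨List.mem_cons_of_mem _ h1, h2, h3⟩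
      · intro p hp hps
        rcases List.mem_cons.1 hp with rfl | hp'
        · have : ¬ p.2 > a.2 := fun h => hc ⟨hps, h⟩
          omega
        · exact I3 p hp' hps
      · intro p hp hps heq
        rcases List.mem_cons.1 hp with rfl | hp'
        · rcases I1 with h | ⟨h1, h2, h3⟩
          · exact Or.inl h
          · exact absurd ⟨hps, by omega⟩ hc
        · exact I4 p hp' hps heq

-- the invariant, instantiated to A's loop
lemma pvMaxA_inv (lst skip : List Int) :
    (pvMaxA lst skip = (-1, -1) ∨
      (pvMaxA lst skip ∈ PySem.List.enumerate lst 0 ∧ (pvMaxA lst skip).1 ∉ skip ∧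
       (-1 : Int) < (pvMaxA lst skip).2)) ∧
    (∀ p ∈ PySem.List.enumerate lst 0, p.1 ∉ skip → p.2 ≤ (pvMaxA lst skip).2) ∧
    (∀ p ∈ PySem.List.enumerate lst 0, p.1 ∉ skip → p.2 = (pvMaxA lst skip).2 →
      pvMaxA lst skip = (-1, -1) ∨ (pvMaxA lst skip).1 ≤ p.1) := by
  have h := pvFold_inv skip (PySem.List.enumerate lst 0)
    (PySem.List.pairwise_lt_enumerate lst 0) ((-1 : Int), (-1 : Int))
  exact ⟨h.1, h.2.2.1, h.2.2.2⟩

lemma pvMaxA_empty (lst skip : List Int) (h : pvE lst skip = []) :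
    pvMaxA lst skip = (-1, -1) := by
  obtain ⟨I1, -, -⟩ := pvMaxA_inv lst skip
  rcases I1 with h1 | ⟨h1, h2, h3⟩
  · exact h1
  · exfalso
    have hmem : pvMaxA lst skip ∈ pvE lst skip := by
      refine List.mem_filter.2 ⟨h1, ?_⟩
      simp only [Bool.and_eq_true, decide_eq_true_eq]
      exact ⟨h2, h3⟩
    rw [h] at hmem
    exact List.not_mem_nil hmem

-- pvMaxA is eligible and pvKey-minimal as soon as any candidate exists
lemma pvMaxA_spec (lst skip : List Int) (w : Int × Int) (hw : w ∈ pvE lst skip) :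
    pvMaxA lst skip ∈ pvE lst skip ∧ ∀ y ∈ pvE lst skip, pvKey (pvMaxA lst skip) ≤ pvKey y := by
  obtain ⟨I1, I3, I4⟩ := pvMaxA_inv lst skip
  obtain ⟨hwm, hwP⟩ := List.mem_filter.1 hw
  simp only [Bool.and_eq_true, decide_eq_true_eq] at hwP
  have hmax2 : w.2 ≤ (pvMaxA lst skip).2 := I3 w hwm hwP.1
  have hr2 : (-1 : Int) < (pvMaxA lst skip).2 := lt_of_lt_of_le hwP.2 hmax2
  have hne : pvMaxA lst skip ≠ (-1, -1) := by
    intro h; rw [h] at hr2; exact lt_irrefl _ hr2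
  rcases I1 with h | ⟨h1, h2, h3⟩
  · exact absurd h hne
  · have hmem : pvMaxA lst skip ∈ pvE lst skip :=
      List.mem_filter.2 ⟨h1, by simp only [Bool.and_eq_true, decide_eq_true_eq]; exact ⟨h2, h3⟩⟩
    refine ⟨hmem, fun y hy => ?_⟩
    obtain ⟨hym, hyP⟩ := List.mem_filter.1 hy
    simp only [Bool.and_eq_true, decide_eq_true_eq] at hyP
    have hyle : y.2 ≤ (pvMaxA lst skip).2 := I3 y hym hyP.1
    rcases eq_or_lt_of_le hyle with hye | hlt
    · rcases I4 y hym hyP.1 hye with h | hle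
      · exact absurd h hne
      · show toLex (-(pvMaxA lst skip).2, (pvMaxA lst skip).1) ≤ toLex (-y.2, y.1)
        rw [Prod.Lex.le_iff]
        exact Or.inr ⟨by simp; omega, by simpa using hle⟩
    · show toLex (-(pvMaxA lst skip).2, (pvMaxA lst skip).1) ≤ toLex (-y.2, y.1)
      rw [Prod.Lex.le_iff]
      exact Or.inl (by simp; omega)

lemma pvMaxA_eq_head (lst skip : List Int) (h : Int × Int) (t : List (Int × Int))
    (hs : pvSorted lst skip = h :: t) : pvMaxA lst skip = h := by
  have hperm : (h :: t).Perm (pvE lst skip) := hs ▸ PySem.List.sorted_perm _ _ _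
  have hhE : h ∈ pvE lst skip := hperm.mem_iff.1 List.mem_cons_self
  obtain ⟨hmem, hmin⟩ := pvMaxA_spec lst skip h hhE
  have hhmin : ∀ y ∈ pvE lst skip, pvKey h ≤ pvKey y :=
    PySem.List.key_head_sorted_le (pvE lst skip) pvKey hs
  exact pvKey_inj (le_antisymm (hmin h hhE) (hhmin _ hmem))

-- growing the skip list = filtering the candidates
lemma pvE_skip_append (lst skip : List Int) (i : Int) :
    pvE lst (skip ++ [i]) = (pvE lst skip).filter (fun p => decide (p.1 ≠ i)) := by
  unfold pvE
  rw [List.filter_filter]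
  apply List.filter_congr
  intro p _
  by_cases h1 : p.1 ∈ skip <;> by_cases h2 : p.1 = i <;> by_cases h3 : p.2 > -1 <;>
    simp [h1, h2, h3, List.mem_append]

lemma pvSorted_skip_neg_one (lst skip : List Int) :
    pvSorted lst (skip ++ [-1]) = pvSorted lst skip := by
  unfold pvSorted
  rw [pvE_skip_append]
  congr 1
  apply List.filter_eq_self.2
  intro p hp
  have := pvE_fst_nonneg hp
  simp
  omega

-- skipping the head's index drops exactly the head of the sorted candidate list
lemma pvSorted_tail (lst skip : List Int) (h : Int × Int) (t : List (Int × Int))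
    (hs : pvSorted lst skip = h :: t) : pvSorted lst (skip ++ [h.1]) = t := by
  have hperm : (h :: t).Perm (pvE lst skip) := hs ▸ PySem.List.sorted_perm _ _ _
  have hpl : (h :: t).Pairwise (fun a b => pvKey a < pvKey b) := hs ▸ pvSorted_pairwise_lt lst skip
  have hne1 : (h :: t).Pairwise (fun a b => a.1 ≠ b.1) := by
    have hE : (pvE lst skip).Pairwise (fun a b => a.1 ≠ b.1) :=
      ((PySem.List.pairwise_lt_enumerate lst 0).filter _).imp (fun {a b} hab => ne_of_lt hab)
    exact (hperm.pairwise_iff (fun {a b} hab h => hab h.symm)).2 hE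
  have htne : ∀ p ∈ t, p.1 ≠ h.1 :=
    fun p hp he => ((List.pairwise_cons.1 hne1).1 p hp) he.symm
  have hfilter : t.Perm ((pvE lst skip).filter (fun p => decide (p.1 ≠ h.1))) := by
    have hstep : ((h :: t).filter (fun p => decide (p.1 ≠ h.1))).Perm
        ((pvE lst skip).filter (fun p => decide (p.1 ≠ h.1))) := hperm.filter _
    have hft : (h :: t).filter (fun p => decide (p.1 ≠ h.1)) = t := by
      rw [List.filter_cons]
      simp only [ne_eq, not_true_eq_false, decide_false, Bool.false_eq_true, if_false]
      exact List.filter_eq_self.2 (fun p hp => by simpa using htne p hp)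
    exact hft ▸ hstep
  unfold pvSorted
  rw [pvE_skip_append]
  exact PySem.List.sorted_eq_of_perm_of_pairwise_lt _ t pvKey hfilter
    ((List.pairwise_cons.1 hpl).2)

-- A's recursion returns the fuel-th entry of the sorted candidate list
lemma pvRecA_eq (lst : List Int) (fuel : Nat) (skip : List Int) :
    pvRecA lst fuel skip = ((pvSorted lst skip)[fuel]?).getD (-1, -1) := by
  induction fuel generalizing skip with
  | zero =>
    cases hs : pvSorted lst skip with
    | nil =>
      have hE : pvE lst skip = [] := (PySem.List.sorted_eq_nil_iff _ _ _).1 hs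
      simp [pvRecA, pvMaxA_empty lst skip hE]
    | cons h t => simp [pvRecA, pvMaxA_eq_head lst skip h t hs]
  | succ f ih =>
    cases hs : pvSorted lst skip with
    | nil =>
      have hE : pvE lst skip = [] := (PySem.List.sorted_eq_nil_iff _ _ _).1 hs
      have hm : pvMaxA lst skip = (-1, -1) := pvMaxA_empty lst skip hE
      show pvRecA lst f (skip ++ [(pvMaxA lst skip).1]) = _
      rw [hm, ih, pvSorted_skip_neg_one, hs]
      simp
    | cons h t =>
      have hm : pvMaxA lst skip = h := pvMaxA_eq_head lst skip h t hs
      show pvRecA lst f (skip ++ [(pvMaxA lst skip).1]) = _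
      rw [hm, ih, pvSorted_tail lst skip h t hs]
      simp

-- B's candidate list IS pvSorted (sorted2 → lex sort, set membership → list membership)
lemma pvCand_eq (lst s0 : List Int) :
    PySem.List.sorted2
      ((PySem.List.enumerate lst 0).filter
        (fun p => decide (p.1 ∉ (PySem.Set.ofList s0 : List Int)) && decide (p.2 > -1)))
      (fun p => -p.2) (fun p => p.1) = pvSorted lst s0 := by
  rw [pvSorted2_eq_sorted]
  unfold pvSorted pvE
  have hf : (PySem.List.enumerate lst 0).filter
        (fun p => decide (p.1 ∉ (PySem.Set.ofList s0 : List Int)) && decide (p.2 > -1))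
      = (PySem.List.enumerate lst 0).filter
        (fun p => decide (p.1 ∉ s0) && decide (p.2 > -1)) := by
    apply List.filter_congr
    intro p _
    by_cases h : p.1 ∈ s0 <;> simp [h, PySem.Set.mem_ofList]
  rw [hf]
  rfl

-- ===== VERDICT (by name: the statement is the Claim_ definition above) =====
theorem get_n_best_prediction_spec : Claim_equal_get_n_best_prediction := by
  intro lst n skip_indices _ hpre
  obtain ⟨h1, h2⟩ := hpre
  unfold Spec_get_n_best_prediction get_n_best_prediction get_n_best_prediction_alt
  rw [if_neg (not_lt.2 h2), if_neg (not_lt.2 h2)]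
  have hkey : ∀ s0 : List Int,
      pvRecA lst (n - 1).toNat s0
        = (if n - 1 < ((PySem.List.sorted2
              ((PySem.List.enumerate lst 0).filter
                (fun p => decide (p.1 ∉ (PySem.Set.ofList s0 : List Int)) && decide (p.2 > -1)))
              (fun p => -p.2) (fun p => p.1)).length : Int)
           then (PySem.List.pyGet? (PySem.List.sorted2
              ((PySem.List.enumerate lst 0).filter
                (fun p => decide (p.1 ∉ (PySem.Set.ofList s0 : List Int)) && decide (p.2 > -1)))
              (fun p => -p.2) (fun p => p.1)) (n - 1)).getD (-1, -1)
           else (-1, -1)) := by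
    intro s0
    rw [pvCand_eq, pvRecA_eq]
    have hk : n - 1 = ((n - 1).toNat : Int) := by omega
    rw [hk, PySem.List.pyGet?_natCast]
    simp only [Int.toNat_natCast]
    by_cases hlen : (n - 1).toNat < (pvSorted lst s0).length
    · rw [if_pos (by exact_mod_cast hlen), List.getElem?_eq_getElem hlen]
    · rw [if_neg (by intro hc; exact hlen (by exact_mod_cast hc)),
        List.getElem?_eq_none (by omega)]
      rfl
  cases skip_indices with
  | none => exact hkey []
  | some s => exact hkey s
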